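-- pv_equiv track=rewrite | github.com/WiktoriaSadlo/pp1 | 04-Subroutines/zad_36.py | f
-- ===== SOURCE A (Python) =====
-- def f(n):
--     people = 0
--     for x in range(len(n)):
--         if n[x]=='+':
--             people += 1
--             if people>=3:
--                 return True
--         else:
--             people -= 1
--     return False
-- ===== SOURCE B (Python) =====
-- def f(n):
--     # Divide and conquer: for each half compute (total sum, max prefix sum)
--     # with '+' = +1 and anything else = -1, combine the halves with the
--     # segment-tree rule, and test whether the max prefix sum reaches 3.
--     def dc(s):
--         if not s:
--             return (0, 0)
--         if len(s) == 1:
--             v = 1 if s == '+' else -1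
--             return (v, max(0, v))
--         k = len(s) // 2
--         s1, m1 = dc(s[:k])
--         s2, m2 = dc(s[k:])
--         return (s1 + s2, max(m1, s1 + m2))
--     return dc(n)[1] >= 3
-- ===== Notes on version B (the rewrite author's own statement) =====
-- stated objective: alternative
-- what changed: Replaces A's linear left-to-right counter with early exit by a divide-and-conquer that computes (total sum, max prefix sum) for each half of the string and combines them with the segment-tree merge rule, then tests max prefix sum >= 3.
import Mathlib
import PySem

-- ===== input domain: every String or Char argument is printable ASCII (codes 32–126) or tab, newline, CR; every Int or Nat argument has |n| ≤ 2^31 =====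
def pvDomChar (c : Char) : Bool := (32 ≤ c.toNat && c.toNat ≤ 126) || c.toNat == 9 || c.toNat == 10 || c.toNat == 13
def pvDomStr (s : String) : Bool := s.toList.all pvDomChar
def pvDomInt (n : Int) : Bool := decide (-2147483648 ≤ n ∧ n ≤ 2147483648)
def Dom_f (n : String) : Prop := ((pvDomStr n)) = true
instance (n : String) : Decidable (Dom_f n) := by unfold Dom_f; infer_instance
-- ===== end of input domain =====

-- B replaces A's linear early-exit counter by a divide-and-conquer computing (total sum, max prefix sum) per half with the segment-tree merge rule (alternative decomposition, not claimed faster).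


-- ===== PORT A =====
-- A's loop over the characters with the running counter `people`,
-- early-returning true as soon as it reaches 3 right after a '+'.
def fGo : List Char → Int → Bool
  | [], _ => false
  | c :: rest, people =>
    if c = '+' then
      if people + 1 ≥ 3 then true else fGo rest (people + 1)
    else
      fGo rest (people - 1)

def f (n : String) : Bool := fGo n.toList 0

-- ===== PORT B =====
-- B's divide and conquer: (total sum, max prefix sum) of each half,
-- combined with (s1+s2, max m1 (s1+m2)); answer is max prefix sum ≥ 3.
-- structural recursion on a fuel = list length (totality device only; the
-- algorithm is exactly Source B's halving recursion)
def dcB : Nat → List Char → Int × Int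
  | _, [] => (0, 0)
  | _, [c] =>
    let v : Int := if c = '+' then 1 else -1
    (v, max 0 v)
  | 0, _ :: _ :: _ => (0, 0)  -- never reached when fuel ≥ length
  | fuel + 1, c1 :: c2 :: rest =>
    let k := (c1 :: c2 :: rest).length / 2
    let p := dcB fuel ((c1 :: c2 :: rest).take k)
    let q := dcB fuel ((c1 :: c2 :: rest).drop k)
    (p.1 + q.1, max p.2 (p.1 + q.2))

def f_alt (n : String) : Bool := decide ((dcB n.toList.length n.toList).2 ≥ 3)

-- ===== PRECONDITION & SPEC =====
def Spec_f (n : String) (out : Bool) : Prop := out = f_alt n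
instance (n : String) (out : Bool) : Decidable (Spec_f n out) := by unfold Spec_f; infer_instance

-- ===== CLAIM (what is proved, stated in full; the proofs are below) =====
def Claim_equal_f : Prop := ∀ (n : String), Dom_f n → Spec_f n (f n)

-- ===== LEMMAS AND PROOFS =====

/-- Total sum of the ±1 values. -/
def lsum : List Char → Int
  | [] => 0
  | c :: cs => (if c = '+' then 1 else -1) + lsum cs

/-- Max prefix sum (empty prefix included, hence ≥ 0). -/
def mpre : List Char → Int
  | [] => 0
  | c :: cs => max 0 ((if c = '+' then 1 else -1) + mpre cs)

theorem mpre_nonneg (l : List Char) : 0 ≤ mpre l := by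
  cases l <;> simp [mpre]

theorem lsum_append (a b : List Char) : lsum (a ++ b) = lsum a + lsum b := by
  induction a with
  | nil => simp [lsum]
  | cons c cs ih => simp [lsum, ih]; ring

theorem mpre_append (a b : List Char) :
    mpre (a ++ b) = max (mpre a) (lsum a + mpre b) := by
  induction a with
  | nil => simp [mpre, lsum, mpre_nonneg]
  | cons c cs ih =>
    simp only [List.cons_append, mpre, lsum, ih]
    omega

theorem dcB_eq (fuel : Nat) (l : List Char) (hl : l.length ≤ fuel) :
    dcB fuel l = (lsum l, mpre l) := by
  induction fuel generalizing l with
  | zero =>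
    cases l with
    | nil => rfl
    | cons c t => simp at hl
  | succ f ih =>
    cases l with
    | nil => rfl
    | cons c1 t =>
      cases t with
      | nil => simp only [dcB, lsum, mpre, add_zero]
      | cons c2 rest =>
        simp only [dcB]
        rw [ih (((c1 :: c2 :: rest)).take ((c1 :: c2 :: rest).length / 2))
              (by simp only [List.length_take, List.length_cons] at hl ⊢; omega),
            ih (((c1 :: c2 :: rest)).drop ((c1 :: c2 :: rest).length / 2))
              (by simp only [List.length_drop, List.length_cons] at hl ⊢; omega)]
        have h := mpre_append ((c1 :: c2 :: rest).take ((c1 :: c2 :: rest).length / 2))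
          ((c1 :: c2 :: rest).drop ((c1 :: c2 :: rest).length / 2))
        have hs := lsum_append ((c1 :: c2 :: rest).take ((c1 :: c2 :: rest).length / 2))
          ((c1 :: c2 :: rest).drop ((c1 :: c2 :: rest).length / 2))
        simp only [List.take_append_drop] at h hs
        simp only [h, hs]

theorem fGo_eq (l : List Char) (p : Int) (hp : p < 3) :
    fGo l p = decide (3 ≤ p + mpre l) := by
  induction l generalizing p with
  | nil =>
    simp only [fGo, mpre, add_zero]
    symm
    simp only [decide_eq_false_iff_not]
    omega
  | cons c cs ih =>
    by_cases hc : c = '+'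
    · by_cases h3 : p + 1 ≥ 3
      · have := mpre_nonneg cs
        simp [fGo, mpre, hc, h3]
        omega
      · simp only [fGo, mpre, hc, if_true, if_neg h3]
        rw [ih (p + 1) (by omega)]
        congr 1
        simp only [eq_iff_iff]
        omega
    · simp only [fGo, mpre, if_neg hc]
      rw [ih (p - 1) (by omega)]
      congr 1
      simp only [eq_iff_iff]
      omega

-- ===== VERDICT (by name: the statement is the Claim_ definition above) =====
theorem f_spec : Claim_equal_f := by
  intro n _
  unfold Spec_f f f_alt
  rw [dcB_eq n.toList.length n.toList le_rfl, fGo_eq n.toList 0 (by norm_num)]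
  simp
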